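-- pv_equiv track=rewrite | github.com/2CentsCapitalHR/ai-engineer-task-Shijilan27 | corporate_agent/checklists.py | normalize_type_label
-- ===== SOURCE A (Python) =====
-- from typing import Dict, List
--
-- DOCUMENT_TYPE_ALIASES: Dict[str, List[str]] = {
--     "Articles of Association": ["AoA", "Articles"],
--     "Memorandum of Association": ["MoA", "MoU", "Memorandum"],
--     "Board Resolution": ["BR", "Board Resolution Template"],
--     "Shareholder Resolution": ["SR", "Shareholder Resolution Template"],
--     "Incorporation Application": ["Application Form", "Incorporation Form"],
--     "UBO Declaration": ["UBO", "Ultimate Beneficial Owner Declaration"],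
--     "Register of Members and Directors": ["Register of Members", "Register of Directors"],
--     "Change of Registered Address Notice": ["Change of Address"],
--     "License Application": ["Licensing Application"],
-- }
--
-- def normalize_type_label(label: str) -> str:
--     label = label.strip()
--     for canonical, aliases in DOCUMENT_TYPE_ALIASES.items():
--         if label == canonical:
--             return canonical
--         if any(label.lower() == a.lower() for a in aliases):
--             return canonical
--     return label
-- ===== SOURCE B (Python) =====
-- from typing import Dict, List
--
-- DOCUMENT_TYPE_ALIASES: Dict[str, List[str]] = {
--     "Articles of Association": ["AoA", "Articles"],
--     "Memorandum of Association": ["MoA", "MoU", "Memorandum"],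
--     "Board Resolution": ["BR", "Board Resolution Template"],
--     "Shareholder Resolution": ["SR", "Shareholder Resolution Template"],
--     "Incorporation Application": ["Application Form", "Incorporation Form"],
--     "UBO Declaration": ["UBO", "Ultimate Beneficial Owner Declaration"],
--     "Register of Members and Directors": ["Register of Members", "Register of Directors"],
--     "Change of Registered Address Notice": ["Change of Address"],
--     "License Application": ["Licensing Application"],
-- }
--
-- ALIAS_LOOKUP: Dict[str, str] = {
--     alias.lower(): canonical
--     for canonical, aliases in DOCUMENT_TYPE_ALIASES.items()
--     for alias in aliases
-- }
--
-- def normalize_type_label(label: str) -> str: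
--     label = label.strip()
--     if label in DOCUMENT_TYPE_ALIASES:
--         return label
--     return ALIAS_LOOKUP.get(label.lower(), label)
-- ===== Notes on version B (the rewrite author's own statement) =====
-- stated objective: idiomatic
-- what changed: Replaces A's per-call linear scan over the alias table (with a nested any-scan of each alias list) by two module-level precomputed indexes: dict-key membership for case-sensitive canonical names and a flattened lowercased-alias-to-canonical dict, so normalization is two lookups.
import Mathlib
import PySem

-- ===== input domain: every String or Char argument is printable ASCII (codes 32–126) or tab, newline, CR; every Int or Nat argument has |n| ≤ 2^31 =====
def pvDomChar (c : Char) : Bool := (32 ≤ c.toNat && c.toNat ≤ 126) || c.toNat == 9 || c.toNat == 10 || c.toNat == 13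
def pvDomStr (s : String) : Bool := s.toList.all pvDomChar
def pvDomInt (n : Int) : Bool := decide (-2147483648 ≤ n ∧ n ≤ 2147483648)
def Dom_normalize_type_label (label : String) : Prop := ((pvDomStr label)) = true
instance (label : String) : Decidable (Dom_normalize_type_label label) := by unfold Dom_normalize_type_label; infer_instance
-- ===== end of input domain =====

-- B replaces A's linear scan of the alias table by two precomputed indexes (canonical-name
-- membership + a lowered-alias lookup dict); objective: idiomatic/faster-constant lookup.

-- the module-level DOCUMENT_TYPE_ALIASES dict, in insertion order (shared literal data)
def pvDocumentTypeAliases : List (String × List String) :=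
  [("Articles of Association", ["AoA", "Articles"]),
   ("Memorandum of Association", ["MoA", "MoU", "Memorandum"]),
   ("Board Resolution", ["BR", "Board Resolution Template"]),
   ("Shareholder Resolution", ["SR", "Shareholder Resolution Template"]),
   ("Incorporation Application", ["Application Form", "Incorporation Form"]),
   ("UBO Declaration", ["UBO", "Ultimate Beneficial Owner Declaration"]),
   ("Register of Members and Directors", ["Register of Members", "Register of Directors"]),
   ("Change of Registered Address Notice", ["Change of Address"]),
   ("License Application", ["Licensing Application"])]

-- ===== PORT A =====
-- the `for canonical, aliases in DOCUMENT_TYPE_ALIASES.items():` loop with its two early returns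
def pvALoop (l : String) : List (String × List String) → String
  | [] => l
  | (canonical, aliases) :: rest =>
      if l = canonical then canonical
      else if aliases.any (fun a => PySem.Str.lower l = PySem.Str.lower a) then canonical
      else pvALoop l rest

def normalize_type_label (label : String) : String :=
  pvALoop (PySem.Str.strip label) pvDocumentTypeAliases

-- ===== PORT B =====
-- ALIAS_LOOKUP = {alias.lower(): canonical for canonical, aliases in … for alias in aliases}
-- (all lowered aliases are distinct, so first-match lookup on the pair list is the dict lookup)
def pvAliasLookup : List (String × String) :=
  pvDocumentTypeAliases.flatMap (fun p => p.2.map (fun a => (PySem.Str.lower a, p.1)))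

def pvGet (k : String) (dflt : String) : List (String × String) → String
  | [] => dflt
  | (k', v) :: rest => if k = k' then v else pvGet k dflt rest

def normalize_type_label_alt (label : String) : String :=
  let l := PySem.Str.strip label
  if l ∈ pvDocumentTypeAliases.map Prod.fst then l
  else pvGet (PySem.Str.lower l) l pvAliasLookup

-- ===== PRECONDITION & SPEC =====
def Spec_normalize_type_label (label : String) (out : String) : Prop := out = normalize_type_label_alt label
instance (label : String) (out : String) : Decidable (Spec_normalize_type_label label out) := by unfold Spec_normalize_type_label; infer_instance

-- ===== CLAIM (what is proved, stated in full; the proofs are below) =====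
def Claim_equal_normalize_type_label : Prop := ∀ (label : String), Dom_normalize_type_label label → Spec_normalize_type_label label (normalize_type_label label)

-- ===== LEMMAS AND PROOFS =====
set_option maxRecDepth 40000 in
set_option maxHeartbeats 4000000 in
theorem pv_agree (s : String) :
    pvALoop s pvDocumentTypeAliases =
      (if s ∈ pvDocumentTypeAliases.map Prod.fst then s
       else pvGet (PySem.Str.lower s) s pvAliasLookup) := by
  by_cases hm : s ∈ pvDocumentTypeAliases.map Prod.fst
  · rw [if_pos hm]
    simp only [pvDocumentTypeAliases, List.map, List.mem_cons, List.not_mem_nil, or_false] at hm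
    rcases hm with h|h|h|h|h|h|h|h|h <;> subst h <;> decide
  · rw [if_neg hm]
    simp only [pvDocumentTypeAliases, List.map, List.mem_cons, List.not_mem_nil, or_false,
      not_or] at hm
    obtain ⟨n1, n2, n3, n4, n5, n6, n7, n8, n9⟩ := hm
    simp only [pvALoop, pvDocumentTypeAliases, pvAliasLookup, pvGet, List.flatMap, List.map,
      List.cons_append, List.nil_append, List.any_cons, List.any_nil, List.flatten_cons, List.flatten_nil,
      n1, n2, n3, n4, n5, n6, n7, n8, n9, if_false]
    have e1 : PySem.Str.lower "AoA" = "aoa" := by decide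
    have e2 : PySem.Str.lower "Articles" = "articles" := by decide
    have e3 : PySem.Str.lower "MoA" = "moa" := by decide
    have e4 : PySem.Str.lower "MoU" = "mou" := by decide
    have e5 : PySem.Str.lower "Memorandum" = "memorandum" := by decide
    have e6 : PySem.Str.lower "BR" = "br" := by decide
    have e7 : PySem.Str.lower "Board Resolution Template" = "board resolution template" := by decide
    have e8 : PySem.Str.lower "SR" = "sr" := by decide
    have e9 : PySem.Str.lower "Shareholder Resolution Template" = "shareholder resolution template" := by decide
    have e10 : PySem.Str.lower "Application Form" = "application form" := by decide
    have e11 : PySem.Str.lower "Incorporation Form" = "incorporation form" := by decide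
    have e12 : PySem.Str.lower "UBO" = "ubo" := by decide
    have e13 : PySem.Str.lower "Ultimate Beneficial Owner Declaration" = "ultimate beneficial owner declaration" := by decide
    have e14 : PySem.Str.lower "Register of Members" = "register of members" := by decide
    have e15 : PySem.Str.lower "Register of Directors" = "register of directors" := by decide
    have e16 : PySem.Str.lower "Change of Address" = "change of address" := by decide
    have e17 : PySem.Str.lower "Licensing Application" = "licensing application" := by decide
    simp only [e1, e2, e3, e4, e5, e6, e7, e8, e9, e10, e11, e12, e13, e14, e15, e16, e17]
    generalize PySem.Str.lower s = t
    by_cases h1 : t = "aoa"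
    · subst h1; rfl
    by_cases h2 : t = "articles"
    · subst h2; rfl
    by_cases h3 : t = "moa"
    · subst h3; rfl
    by_cases h4 : t = "mou"
    · subst h4; rfl
    by_cases h5 : t = "memorandum"
    · subst h5; rfl
    by_cases h6 : t = "br"
    · subst h6; rfl
    by_cases h7 : t = "board resolution template"
    · subst h7; rfl
    by_cases h8 : t = "sr"
    · subst h8; rfl
    by_cases h9 : t = "shareholder resolution template"
    · subst h9; rfl
    by_cases h10 : t = "application form"
    · subst h10; rfl
    by_cases h11 : t = "incorporation form"
    · subst h11; rfl
    by_cases h12 : t = "ubo"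
    · subst h12; rfl
    by_cases h13 : t = "ultimate beneficial owner declaration"
    · subst h13; rfl
    by_cases h14 : t = "register of members"
    · subst h14; rfl
    by_cases h15 : t = "register of directors"
    · subst h15; rfl
    by_cases h16 : t = "change of address"
    · subst h16; rfl
    by_cases h17 : t = "licensing application"
    · subst h17; rfl
    simp [h1, h2, h3, h4, h5, h6, h7, h8, h9, h10, h11, h12, h13, h14, h15, h16, h17]

-- ===== VERDICT (by name: the statement is the Claim_ definition above) =====
theorem normalize_type_label_spec : Claim_equal_normalize_type_label := by
  intro label _
  unfold Spec_normalize_type_label normalize_type_label normalize_type_label_alt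
  exact pv_agree (PySem.Str.strip label)
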